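-- pv_equiv track=rewrite | github.com/Miss-Inputs/travelpygame | travelpygame/tpg_data/tracker_import.py | _find_season
-- ===== SOURCE A (Python) =====
-- def _find_season(season_starts: list[int], round_number: int) -> int:
-- 	if 1 not in season_starts:
-- 		season_starts.append(1)
-- 	season_starts = sorted(season_starts, reverse=True)
-- 	for season, season_start in enumerate(season_starts):
-- 		if round_number >= season_start:
-- 			return (len(season_starts) - season) - 1
-- 	return 0
-- ===== SOURCE B (Python) =====
-- def _find_season(season_starts: list[int], round_number: int) -> int:
-- 	if 1 not in season_starts:
-- 		season_starts.append(1)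
-- 	count = sum(1 for s in season_starts if s <= round_number)
-- 	return max(count - 1, 0)
-- ===== Notes on version B (the rewrite author's own statement) =====
-- stated objective: faster
-- what changed: Replaces the sort plus descending scan with a single pass that counts season starts <= round_number and returns max(count-1, 0), which equals A's ascending index of the matching start.
import Mathlib
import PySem

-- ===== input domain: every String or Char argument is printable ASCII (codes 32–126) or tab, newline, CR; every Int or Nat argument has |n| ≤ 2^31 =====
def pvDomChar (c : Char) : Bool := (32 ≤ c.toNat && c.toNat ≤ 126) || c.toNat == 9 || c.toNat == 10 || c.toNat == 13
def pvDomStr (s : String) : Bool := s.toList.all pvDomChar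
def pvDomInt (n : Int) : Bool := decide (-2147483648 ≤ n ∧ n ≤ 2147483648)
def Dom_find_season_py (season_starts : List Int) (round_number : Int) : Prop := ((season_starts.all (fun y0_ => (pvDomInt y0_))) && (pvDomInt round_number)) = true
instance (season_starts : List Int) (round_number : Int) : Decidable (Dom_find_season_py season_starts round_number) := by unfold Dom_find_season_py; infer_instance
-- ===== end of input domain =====

-- B replaces A's sort-then-descending-scan by a single counting pass (simpler, no sort);
-- both mutate the caller's list identically in Python, and the theorem is about the return value.


-- ===== PORT A =====
-- the for-loop over enumerate(sorted_list): first start with round_number >= start wins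
def fsLoop (len round_number : Int) : List (Int × Int) → Int
  | [] => 0
  | (season, start) :: rest =>
      if round_number ≥ start then (len - season) - 1 else fsLoop len round_number rest

def find_season_py (season_starts : List Int) (round_number : Int) : Int :=
  let ss := if 1 ∈ season_starts then season_starts else season_starts ++ [1]
  let s := PySem.List.sorted ss (fun x => x) true
  fsLoop (s.length : Int) round_number (PySem.List.enumerate s)

-- ===== PORT B =====
def find_season_py_alt (season_starts : List Int) (round_number : Int) : Int :=
  let ss := if 1 ∈ season_starts then season_starts else season_starts ++ [1]
  let count := ss.foldl (fun acc s => if s ≤ round_number then acc + 1 else acc) (0 : Int)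
  max (count - 1) 0

-- ===== PRECONDITION & SPEC =====
def Spec_find_season_py (season_starts : List Int) (round_number : Int) (out : Int) : Prop := out = find_season_py_alt season_starts round_number
instance (season_starts : List Int) (round_number : Int) (out : Int) : Decidable (Spec_find_season_py season_starts round_number out) := by unfold Spec_find_season_py; infer_instance

-- ===== CLAIM (what is proved, stated in full; the proofs are below) =====
def Claim_equal_find_season_py : Prop := ∀ (season_starts : List Int) (round_number : Int), Dom_find_season_py season_starts round_number → Spec_find_season_py season_starts round_number (find_season_py season_starts round_number)

-- ===== LEMMAS AND PROOFS =====

-- B's counting fold equals countP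
theorem fold_count_eq (r : Int) (xs : List Int) (c : Int) :
    xs.foldl (fun acc s => if s ≤ r then acc + 1 else acc) c
      = c + (xs.countP (fun s => decide (s ≤ r)) : Int) := by
  induction xs generalizing c with
  | nil => simp
  | cons a t ih =>
      simp only [List.foldl_cons, List.countP_cons, ih]
      by_cases h : a ≤ r <;> simp [h] <;> omega

-- A's loop on a nonincreasing list, characterised by the count of qualifying starts
theorem fsLoop_count (r len : Int) (t : List Int) (k : Int)
    (hs : t.Pairwise (fun a b => b ≤ a)) :
    fsLoop len r (PySem.List.enumerate t k)
      = if t.countP (fun s => decide (s ≤ r)) = 0 then 0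
        else len - k - ((t.length : Int) - (t.countP (fun s => decide (s ≤ r)) : Int)) - 1 := by
  induction t generalizing k with
  | nil => simp [fsLoop]
  | cons a t ih =>
      rw [List.pairwise_cons] at hs
      rw [PySem.List.enumerate_cons]
      by_cases h : a ≤ r
      · have hall : ∀ b ∈ t, decide (b ≤ r) = true := by
          intro b hb
          simp only [decide_eq_true_eq]
          exact le_trans (hs.1 b hb) h
        have hcount : t.countP (fun s => decide (s ≤ r)) = t.length :=
          List.countP_eq_length.mpr hall
        simp only [fsLoop, ge_iff_le, h, if_pos, List.countP_cons, hcount,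
          decide_eq_true_eq, List.length_cons]
        rw [if_neg (Nat.succ_ne_zero t.length)]
        push_cast
        ring
      · have hne : ¬ r ≥ a := fun hr => h hr
        simp only [fsLoop, ge_iff_le, ih (k + 1) hs.2, List.countP_cons,
          decide_eq_true_eq, if_neg h, add_zero, List.length_cons]
        by_cases hc : t.countP (fun s => decide (s ≤ r)) = 0
        · simp [hc]
        · rw [if_neg hc, if_neg hc]
          push_cast
          ring

theorem find_season_py_eq (season_starts : List Int) (round_number : Int) :
    find_season_py season_starts round_number = find_season_py_alt season_starts round_number := by
  have key : ∀ ss : List Int, (1 : Int) ∈ ss →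
      fsLoop (((PySem.List.sorted ss (fun x => x) true).length : Nat) : Int) round_number
        (PySem.List.enumerate (PySem.List.sorted ss (fun x => x) true))
      = max (ss.foldl (fun acc s => if s ≤ round_number then acc + 1 else acc) (0 : Int) - 1) 0 := by
    intro ss hone
    set t := PySem.List.sorted ss (fun x => x) true with ht
    have hsorted : t.Pairwise (fun a b => b ≤ a) := PySem.List.sorted_pairwise_rev ss (fun x => x)
    have hperm : t.Perm ss := PySem.List.sorted_perm ss (fun x => x) true
    have hcount : ss.countP (fun s => decide (s ≤ round_number)) = t.countP (fun s => decide (s ≤ round_number)) :=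
      (hperm.countP_eq _).symm
    rw [fold_count_eq, hcount, fsLoop_count round_number (t.length : Int) t 0 hsorted]
    set c := t.countP (fun s => decide (s ≤ round_number)) with hc
    have hcle : c ≤ t.length := List.countP_le_length
    by_cases h0 : c = 0
    · -- nothing qualifies (so round_number < 1, since 1 ∈ ss): both sides are 0
      rw [if_pos h0]
      simp [h0]
    · rw [if_neg h0]
      have hpos : 0 < c := Nat.pos_of_ne_zero h0
      omega
  unfold find_season_py find_season_py_alt
  exact key _ (by by_cases h : (1 : Int) ∈ season_starts <;> simp [h])

-- ===== VERDICT (by name: the statement is the Claim_ definition above) =====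
theorem find_season_py_spec : Claim_equal_find_season_py := by
  intro season_starts round_number _
  unfold Spec_find_season_py
  exact find_season_py_eq season_starts round_number
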